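-- pv_equiv track=rewrite | github.com/christianbean/enumerating-perm-classes | subdecomp_answers.py | embeddings
-- ===== SOURCE A (Python) =====
-- def embeddings(perm, cells):
--     """
--     Yield all possible embeddings of perm into the given cells.
--
--     An embedding should be a tuple (or iterable) of cells.
--     """
--     res = [[]]
--     for i, v in enumerate(perm):
--         new_res = []
--         for pos in res:
--             last_idx = pos[-1][0] if pos else -1
--             for cell in cells:
--                 if cell[0] < last_idx:
--                     continue
--                 good = True
--                 for j, past_cell in enumerate(pos):
--                     if perm[j] < perm[i]:
--                         if past_cell[1] > cell[1]:
--                             good = False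
--                             break
--                     else:
--                         if past_cell[1] < cell[1]:
--                             good = False
--                             break
--                 if good:
--                     new_res.append(pos + [cell])
--         res = new_res
--     return res
-- ===== SOURCE B (Python) =====
-- def embeddings(perm, cells):
--     """
--     Yield all possible embeddings of perm into the given cells.
--
--     DFS backtracking: extend one partial embedding at a time instead of
--     materialising every BFS frontier; same results in the same order.
--     """
--     def extend(rest, pos):
--         if not rest:
--             return [pos]
--         v = rest[0]
--         last = pos[-1][0] if pos else -1
--         out = []
--         for cell in cells:
--             if last <= cell[0] and all(
--                 (pc[1] <= cell[1]) if perm[j] < v else (cell[1] <= pc[1])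
--                 for j, pc in enumerate(pos)
--             ):
--                 out += extend(rest[1:], pos + [cell])
--         return out
--     return extend(perm, [])
-- ===== Notes on version B (the rewrite author's own statement) =====
-- stated objective: alternative
-- what changed: Replaced the breadth-first frontier loop (rebuilding the full list of partial embeddings after each perm element) with a recursive depth-first backtracking helper that extends one partial embedding at a time, preserving the exact output order.
import Mathlib
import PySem

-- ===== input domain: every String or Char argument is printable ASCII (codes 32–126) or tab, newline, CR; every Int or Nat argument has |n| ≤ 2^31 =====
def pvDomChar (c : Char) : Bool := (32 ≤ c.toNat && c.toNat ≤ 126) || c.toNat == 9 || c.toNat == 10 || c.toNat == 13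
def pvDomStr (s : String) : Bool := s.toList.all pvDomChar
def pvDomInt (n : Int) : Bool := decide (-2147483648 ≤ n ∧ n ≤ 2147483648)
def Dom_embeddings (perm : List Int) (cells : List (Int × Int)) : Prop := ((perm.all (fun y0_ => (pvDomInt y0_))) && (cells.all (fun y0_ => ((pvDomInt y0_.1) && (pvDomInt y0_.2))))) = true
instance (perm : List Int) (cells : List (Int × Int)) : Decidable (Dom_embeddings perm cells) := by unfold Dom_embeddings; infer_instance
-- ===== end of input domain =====

-- B replaces A's breadth-first frontier (rebuild all partial embeddings level by level)
-- with depth-first backtracking recursion; same values in the same order (objective: alternative).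

-- ===== PORT A =====
-- `pos[-1][0] if pos else -1`
def lastIdx (pos : List (Int × Int)) : Int :=
  match pos.getLast? with
  | some c => c.1
  | none => -1

-- the `good` check: `for j, past_cell in enumerate(pos): …` with early break = .all;
-- `perm[j]` is always in range here (j < len(pos) ≤ len(perm)), so pyGetD is exact.
def goodCell (perm : List Int) (v : Int) (pos : List (Int × Int)) (cell : Int × Int) : Bool :=
  (PySem.List.enumerate pos 0).all (fun jp =>
    if PySem.List.pyGetD perm jp.1 0 < v then decide (jp.2.2 ≤ cell.2)
    else decide (cell.2 ≤ jp.2.2))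

def embeddings (perm : List Int) (cells : List (Int × Int)) : List (List (Int × Int)) :=
  (PySem.List.enumerate perm 0).foldl (fun res iv =>
    res.foldl (fun new_res pos =>
      cells.foldl (fun acc cell =>
        if cell.1 < lastIdx pos then acc            -- `continue`
        else if goodCell perm iv.2 pos cell then acc ++ [pos ++ [cell]]
        else acc) new_res) []) [[]]

-- ===== PORT B =====
-- `extend(rest, pos)` of Source B: DFS backtracking, structural recursion on the remaining suffix
def extendEmb (perm : List Int) (cells : List (Int × Int)) :
    List Int → List (Int × Int) → List (List (Int × Int))
  | [], pos => [pos]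
  | v :: rest, pos =>
      cells.foldl (fun out cell =>
        if decide (lastIdx pos ≤ cell.1) && goodCell perm v pos cell
        then out ++ extendEmb perm cells rest (pos ++ [cell])
        else out) []

def embeddings_alt (perm : List Int) (cells : List (Int × Int)) : List (List (Int × Int)) :=
  extendEmb perm cells perm []

-- ===== PRECONDITION & SPEC =====
def Spec_embeddings (perm : List Int) (cells : List (Int × Int)) (out : List (List (Int × Int))) : Prop := out = embeddings_alt perm cells
instance (perm : List Int) (cells : List (Int × Int)) (out : List (List (Int × Int))) : Decidable (Spec_embeddings perm cells out) := by unfold Spec_embeddings; infer_instance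

-- ===== CLAIM (what is proved, stated in full; the proofs are below) =====
def Claim_equal_embeddings : Prop := ∀ (perm : List Int) (cells : List (Int × Int)), Dom_embeddings perm cells → Spec_embeddings perm cells (embeddings perm cells)

-- ===== LEMMAS AND PROOFS =====

-- A's outer loop ignores the enumerate index
theorem foldl_enumerate_snd {α β : Type} (f : β → α → β) :
    ∀ (l : List α) (s : Int) (init : β),
      (PySem.List.enumerate l s).foldl (fun acc iv => f acc iv.2) init = l.foldl f init := by
  intro l
  induction l with
  | nil => intro s init; simp [PySem.List.enumerate_nil]
  | cons x xs ih => intro s init; simp [PySem.List.enumerate_cons, ih]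

-- A's inner cells-loop is a filtered map append
theorem innerA (perm : List Int) (v : Int) (pos : List (Int × Int)) :
    ∀ (cs : List (Int × Int)) (acc : List (List (Int × Int))),
      cs.foldl (fun acc cell =>
        if cell.1 < lastIdx pos then acc
        else if goodCell perm v pos cell then acc ++ [pos ++ [cell]]
        else acc) acc
      = acc ++ ((cs.filter (fun cell =>
          decide (lastIdx pos ≤ cell.1) && goodCell perm v pos cell)).map
            (fun cell => pos ++ [cell])) := by
  intro cs
  induction cs with
  | nil => intro acc; simp
  | cons c rest ih =>
    intro acc
    by_cases h1 : c.1 < lastIdx pos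
    · have h2 : ¬ lastIdx pos ≤ c.1 := by omega
      simp [List.foldl, h1, h2, ih]
    · have h2 : lastIdx pos ≤ c.1 := by omega
      by_cases hg : goodCell perm v pos c = true
      · simp [List.foldl, h1, h2, hg, ih]
      · simp [List.foldl, h1, h2, hg, ih]

-- one recursion step of B, in filtered-flatMap form
theorem extend_cons (perm : List Int) (cells : List (Int × Int)) (v : Int)
    (rest : List Int) (pos : List (Int × Int)) :
    extendEmb perm cells (v :: rest) pos
      = (cells.filter (fun cell =>
          decide (lastIdx pos ≤ cell.1) && goodCell perm v pos cell)).flatMap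
          (fun cell => extendEmb perm cells rest (pos ++ [cell])) := by
  show cells.foldl _ [] = _
  rw [PySem.List.foldl_if_eq_foldl_filter, PySem.List.foldl_append_eq_flatMap]
  simp

-- the BFS frontier fold over a suffix equals flatMapping B's DFS over the frontier
theorem bfs_eq_dfs (perm : List Int) (cells : List (Int × Int)) :
    ∀ (suffix : List Int) (res : List (List (Int × Int))),
      suffix.foldl (fun res v =>
        res.foldl (fun new_res pos =>
          cells.foldl (fun acc cell =>
            if cell.1 < lastIdx pos then acc
            else if goodCell perm v pos cell then acc ++ [pos ++ [cell]]
            else acc) new_res) []) res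
      = res.flatMap (fun pos => extendEmb perm cells suffix pos) := by
  intro suffix
  induction suffix with
  | nil => intro res; simp [extendEmb]
  | cons v rest ih =>
    intro res
    rw [List.foldl_cons, ih]
    have hstep :
        res.foldl (fun new_res pos =>
          cells.foldl (fun acc cell =>
            if cell.1 < lastIdx pos then acc
            else if goodCell perm v pos cell then acc ++ [pos ++ [cell]]
            else acc) new_res) []
        = res.flatMap (fun pos =>
            (cells.filter (fun cell =>
              decide (lastIdx pos ≤ cell.1) && goodCell perm v pos cell)).map
              (fun cell => pos ++ [cell])) := by
      simp only [innerA]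
      rw [PySem.List.foldl_append_eq_flatMap]
      simp
    rw [hstep, List.flatMap_assoc]
    refine List.flatMap_congr ?_
    intro pos _
    rw [extend_cons]
    simp [List.flatMap_map]

-- ===== VERDICT (by name: the statement is the Claim_ definition above) =====
theorem embeddings_spec : Claim_equal_embeddings := by
  intro perm cells _
  show embeddings perm cells = embeddings_alt perm cells
  unfold embeddings embeddings_alt
  have h := foldl_enumerate_snd (fun res v =>
        res.foldl (fun new_res pos =>
          cells.foldl (fun acc cell =>
            if cell.1 < lastIdx pos then acc
            else if goodCell perm v pos cell then acc ++ [pos ++ [cell]]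
            else acc) new_res) []) perm 0 [[]]
  rw [h, bfs_eq_dfs]
  simp
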